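-- pv_equiv track=rewrite | github.com/michaelpeterswa/CPSC322Project-WildfireAnalysis | mysklearn/myutils.py | NHTSA_rankings
-- ===== SOURCE A (Python) =====
-- def NHTSA_rankings(array):
--     new_array = []
--     for x in array:
--         if x >= 3500:
--             new_array.append(5)
--         elif x >= 3000:
--             new_array.append(4)
--         elif x >= 2500:
--             new_array.append(3)
--         elif x >= 2000:
--             new_array.append(2)
--         else:
--             new_array.append(1)
--     return new_array
-- ===== SOURCE B (Python) =====
-- THRESHOLDS = [2000, 2500, 3000, 3500]
--
-- def NHTSA_rankings(array):
--     # rating = 1 + number of thresholds the value reaches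
--     return [1 + sum(t <= x for t in THRESHOLDS) for x in array]
-- ===== Notes on version B (the rewrite author's own statement) =====
-- stated objective: idiomatic
-- what changed: Replaces the descending if/elif cascade with a single comprehension that counts, in a sorted threshold table, how many thresholds each value reaches (1 + count), eliminating the branch chain.
import Mathlib
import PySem

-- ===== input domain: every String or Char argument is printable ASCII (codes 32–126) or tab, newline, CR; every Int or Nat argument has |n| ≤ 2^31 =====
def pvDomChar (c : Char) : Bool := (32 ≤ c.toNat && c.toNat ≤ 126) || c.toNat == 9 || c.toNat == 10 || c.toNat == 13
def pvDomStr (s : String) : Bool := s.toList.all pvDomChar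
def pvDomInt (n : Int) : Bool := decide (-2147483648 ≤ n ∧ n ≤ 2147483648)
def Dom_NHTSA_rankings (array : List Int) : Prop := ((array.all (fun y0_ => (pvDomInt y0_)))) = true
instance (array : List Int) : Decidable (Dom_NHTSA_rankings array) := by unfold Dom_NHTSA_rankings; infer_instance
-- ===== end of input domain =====

-- B replaces the if/elif cascade by counting reached thresholds in a sorted table (idiomatic; same cost).


-- ===== PORT A =====
def NHTSA_rankings (array : List Int) : List Int :=
  array.foldl (fun new_array x =>
    if x ≥ 3500 then new_array ++ [5]
    else if x ≥ 3000 then new_array ++ [4]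
    else if x ≥ 2500 then new_array ++ [3]
    else if x ≥ 2000 then new_array ++ [2]
    else new_array ++ [1]) []

-- ===== PORT B =====
def pvTHRESHOLDS : List Int := [2000, 2500, 3000, 3500]

def NHTSA_rankings_alt (array : List Int) : List Int :=
  array.map (fun x => 1 + (Int.ofNat (pvTHRESHOLDS.countP (fun t => t ≤ x))))

-- ===== PRECONDITION & SPEC =====
def Spec_NHTSA_rankings (array : List Int) (out : List Int) : Prop := out = NHTSA_rankings_alt array
instance (array : List Int) (out : List Int) : Decidable (Spec_NHTSA_rankings array out) := by unfold Spec_NHTSA_rankings; infer_instance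

-- ===== CLAIM (what is proved, stated in full; the proofs are below) =====
def Claim_equal_NHTSA_rankings : Prop := ∀ (array : List Int), Dom_NHTSA_rankings array → Spec_NHTSA_rankings array (NHTSA_rankings array)

-- ===== LEMMAS AND PROOFS =====

def pvRankA (x : Int) : Int :=
  if x ≥ 3500 then 5 else if x ≥ 3000 then 4 else if x ≥ 2500 then 3
  else if x ≥ 2000 then 2 else 1

theorem pv_rank_eq (x : Int) :
    pvRankA x = 1 + Int.ofNat (pvTHRESHOLDS.countP (fun t => t ≤ x)) := by
  simp only [pvRankA, pvTHRESHOLDS, List.countP_cons, List.countP_nil, decide_eq_true_eq]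
  split_ifs <;> first | rfl | omega | norm_num

theorem pv_foldl_snoc (xs : List Int) (acc : List Int) :
    xs.foldl (fun new_array x =>
      if x ≥ 3500 then new_array ++ [5]
      else if x ≥ 3000 then new_array ++ [4]
      else if x ≥ 2500 then new_array ++ [3]
      else if x ≥ 2000 then new_array ++ [2]
      else new_array ++ [1]) acc
    = acc ++ xs.map pvRankA := by
  induction xs generalizing acc with
  | nil => simp
  | cons x xs ih =>
      simp only [List.foldl, List.map, pvRankA]
      split_ifs <;> rw [ih] <;> simp

-- ===== VERDICT (by name: the statement is the Claim_ definition above) =====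
theorem NHTSA_rankings_spec : Claim_equal_NHTSA_rankings := by
  intro array _
  unfold Spec_NHTSA_rankings NHTSA_rankings NHTSA_rankings_alt
  rw [pv_foldl_snoc array []]
  simpa using List.map_congr_left (fun x _ => pv_rank_eq x)
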